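-- pv_equiv track=rewrite | github.com/davidjaimes/get_constellation | get_constellation.py | calc_date
-- ===== SOURCE A (Python) =====
-- def calc_date(year):
--     dates = []
--     for x in range(1, 13, 1):
--         for y in range(1, 32, 1):
--             if x == 2:
--                 if year % 4 != 0:
--                     if y > 28: continue
--                 else:
--                     if y > 29: continue
--                 dates.append(f'{year:04d}-{x:02d}-{y:02d}')
--
--             elif x in [4, 6, 9, 11]:
--                 if y > 30: continue
--                 dates.append(f'{year:04d}-{x:02d}-{y:02d}')
--
--             else:
--                 dates.append(f'{year:04d}-{x:02d}-{y:02d}')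
--     return dates
-- ===== SOURCE B (Python) =====
-- def calc_date(year):
--     days = [31, 29 if year % 4 == 0 else 28, 31, 30, 31, 30, 31, 31, 30, 31, 30, 31]
--     dates = []
--     for m in range(1, 13):
--         for d in range(1, days[m - 1] + 1):
--             dates.append(f'{year:04d}-{m:02d}-{d:02d}')
--     return dates
-- ===== Notes on version B (the rewrite author's own statement) =====
-- stated objective: simpler
-- what changed: B computes a month-length table once and runs exactly-bounded inner day loops over it, replacing A's fixed month-by-day scan whose per-day branches and continue-skips decide month lengths inline.
import Mathlib
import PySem

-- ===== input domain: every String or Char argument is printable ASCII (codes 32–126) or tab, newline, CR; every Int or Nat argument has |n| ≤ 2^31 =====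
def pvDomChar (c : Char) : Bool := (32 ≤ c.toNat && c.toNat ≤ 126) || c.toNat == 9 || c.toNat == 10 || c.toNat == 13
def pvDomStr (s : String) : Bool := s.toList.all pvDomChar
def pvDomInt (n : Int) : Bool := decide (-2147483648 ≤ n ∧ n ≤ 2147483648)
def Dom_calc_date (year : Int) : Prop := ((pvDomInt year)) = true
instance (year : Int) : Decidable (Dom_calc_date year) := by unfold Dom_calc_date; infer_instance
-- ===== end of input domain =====

set_option maxHeartbeats 1000000


-- B replaces A's fixed month-by-day scan with continue-skips by a month-length table
-- and exactly-bounded inner loops (objective: simpler).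

-- f'{n:0wd}' : zero-pad str(n) to width w, sign in front (exact: Python's zfill rule)
def pvFmt (n : Int) (w : Int) : String := PySem.Str.zfill (PySem.Int.toStr n) w

def pvDate (year x y : Int) : String :=
  pvFmt year 4 ++ "-" ++ pvFmt x 2 ++ "-" ++ pvFmt y 2

-- ===== PORT A =====
def calc_date (year : Int) : List String :=
  (PySem.List.pyRange 1 13 1).foldl (fun dates x =>
    (PySem.List.pyRange 1 32 1).foldl (fun dates y =>
      if x = 2 then
        if PySem.Int.mod year 4 ≠ 0 then
          if y > 28 then dates else dates ++ [pvDate year x y]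
        else
          if y > 29 then dates else dates ++ [pvDate year x y]
      else if x = 4 ∨ x = 6 ∨ x = 9 ∨ x = 11 then
        if y > 30 then dates else dates ++ [pvDate year x y]
      else dates ++ [pvDate year x y]) dates) []

-- ===== PORT B =====
def calc_date_alt (year : Int) : List String :=
  let days : List Int :=
    [31, if PySem.Int.mod year 4 = 0 then 29 else 28, 31, 30, 31, 30, 31, 31, 30, 31, 30, 31]
  (PySem.List.pyRange 1 13 1).foldl (fun dates m =>
    (PySem.List.pyRange 1 (PySem.List.pyGetD days (m - 1) 0 + 1) 1).foldl (fun dates d =>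
      dates ++ [pvDate year m d]) dates) []

-- ===== PRECONDITION & SPEC =====
def Spec_calc_date (year : Int) (out : List String) : Prop := out = calc_date_alt year
instance (year : Int) (out : List String) : Decidable (Spec_calc_date year out) := by unfold Spec_calc_date; infer_instance

-- ===== CLAIM (what is proved, stated in full; the proofs are below) =====
def Claim_equal_calc_date : Prop := ∀ (year : Int), Dom_calc_date year → Spec_calc_date year (calc_date year)

-- ===== LEMMAS AND PROOFS =====

theorem pv_flat {α β : Type} (f : α → β) (l : List α) :
    (List.map (fun x => [f x]) l).flatten = l.map f := by
  induction l with
  | nil => rfl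
  | cons x t ih => simp [ih]

-- A's 'if y > m: continue' loop appends exactly the y with y ≤ m, in order
theorem pv_foldl_skip (f : Int → String) (m : Int) :
    ∀ (l : List Int) (acc : List String),
      l.foldl (fun ds y => if y > m then ds else ds ++ [f y]) acc
        = acc ++ (l.filter (fun y => decide (y ≤ m))).map f := by
  intro l
  induction l with
  | nil => intro acc; simp
  | cons y t ih =>
    intro acc
    by_cases h : y > m
    · have h' : ¬ y ≤ m := by omega
      simp [List.foldl, h, h', ih]
    · have h' : y ≤ m := by omega
      simp [List.foldl, h, h', ih]

theorem pv_f28 : (PySem.List.pyRange 1 32 1).filter (fun y => decide (y ≤ (28:Int)))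
    = PySem.List.pyRange 1 29 1 := by decide
theorem pv_f29 : (PySem.List.pyRange 1 32 1).filter (fun y => decide (y ≤ (29:Int)))
    = PySem.List.pyRange 1 30 1 := by decide
theorem pv_f30 : (PySem.List.pyRange 1 32 1).filter (fun y => decide (y ≤ (30:Int)))
    = PySem.List.pyRange 1 31 1 := by decide
theorem pv_d0 : PySem.List.pyGetD ([31, 29, 31, 30, 31, 30, 31, 31, 30, 31, 30, 31] : List Int) 0 0 = 31 := by decide
theorem pv_d1 : PySem.List.pyGetD ([31, 29, 31, 30, 31, 30, 31, 31, 30, 31, 30, 31] : List Int) 1 0 = 29 := by decide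
theorem pv_d2 : PySem.List.pyGetD ([31, 29, 31, 30, 31, 30, 31, 31, 30, 31, 30, 31] : List Int) 2 0 = 31 := by decide
theorem pv_d3 : PySem.List.pyGetD ([31, 29, 31, 30, 31, 30, 31, 31, 30, 31, 30, 31] : List Int) 3 0 = 30 := by decide
theorem pv_d4 : PySem.List.pyGetD ([31, 29, 31, 30, 31, 30, 31, 31, 30, 31, 30, 31] : List Int) 4 0 = 31 := by decide
theorem pv_d5 : PySem.List.pyGetD ([31, 29, 31, 30, 31, 30, 31, 31, 30, 31, 30, 31] : List Int) 5 0 = 30 := by decide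
theorem pv_d6 : PySem.List.pyGetD ([31, 29, 31, 30, 31, 30, 31, 31, 30, 31, 30, 31] : List Int) 6 0 = 31 := by decide
theorem pv_d7 : PySem.List.pyGetD ([31, 29, 31, 30, 31, 30, 31, 31, 30, 31, 30, 31] : List Int) 7 0 = 31 := by decide
theorem pv_d8 : PySem.List.pyGetD ([31, 29, 31, 30, 31, 30, 31, 31, 30, 31, 30, 31] : List Int) 8 0 = 30 := by decide
theorem pv_d9 : PySem.List.pyGetD ([31, 29, 31, 30, 31, 30, 31, 31, 30, 31, 30, 31] : List Int) 9 0 = 31 := by decide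
theorem pv_d10 : PySem.List.pyGetD ([31, 29, 31, 30, 31, 30, 31, 31, 30, 31, 30, 31] : List Int) 10 0 = 30 := by decide
theorem pv_d11 : PySem.List.pyGetD ([31, 29, 31, 30, 31, 30, 31, 31, 30, 31, 30, 31] : List Int) 11 0 = 31 := by decide
theorem pv_c0 : PySem.List.pyGetD ([31, 28, 31, 30, 31, 30, 31, 31, 30, 31, 30, 31] : List Int) 0 0 = 31 := by decide
theorem pv_c1 : PySem.List.pyGetD ([31, 28, 31, 30, 31, 30, 31, 31, 30, 31, 30, 31] : List Int) 1 0 = 28 := by decide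
theorem pv_c2 : PySem.List.pyGetD ([31, 28, 31, 30, 31, 30, 31, 31, 30, 31, 30, 31] : List Int) 2 0 = 31 := by decide
theorem pv_c3 : PySem.List.pyGetD ([31, 28, 31, 30, 31, 30, 31, 31, 30, 31, 30, 31] : List Int) 3 0 = 30 := by decide
theorem pv_c4 : PySem.List.pyGetD ([31, 28, 31, 30, 31, 30, 31, 31, 30, 31, 30, 31] : List Int) 4 0 = 31 := by decide
theorem pv_c5 : PySem.List.pyGetD ([31, 28, 31, 30, 31, 30, 31, 31, 30, 31, 30, 31] : List Int) 5 0 = 30 := by decide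
theorem pv_c6 : PySem.List.pyGetD ([31, 28, 31, 30, 31, 30, 31, 31, 30, 31, 30, 31] : List Int) 6 0 = 31 := by decide
theorem pv_c7 : PySem.List.pyGetD ([31, 28, 31, 30, 31, 30, 31, 31, 30, 31, 30, 31] : List Int) 7 0 = 31 := by decide
theorem pv_c8 : PySem.List.pyGetD ([31, 28, 31, 30, 31, 30, 31, 31, 30, 31, 30, 31] : List Int) 8 0 = 30 := by decide
theorem pv_c9 : PySem.List.pyGetD ([31, 28, 31, 30, 31, 30, 31, 31, 30, 31, 30, 31] : List Int) 9 0 = 31 := by decide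
theorem pv_c10 : PySem.List.pyGetD ([31, 28, 31, 30, 31, 30, 31, 31, 30, 31, 30, 31] : List Int) 10 0 = 30 := by decide
theorem pv_c11 : PySem.List.pyGetD ([31, 28, 31, 30, 31, 30, 31, 31, 30, 31, 30, 31] : List Int) 11 0 = 31 := by decide

theorem pv_e13 : PySem.List.pyRange 1 13 1 = [1, 2, 3, 4, 5, 6, 7, 8, 9, 10, 11, 12] := by decide

-- ===== VERDICT (by name: the statement is the Claim_ definition above) =====
theorem calc_date_spec : Claim_equal_calc_date := by
  intro year _
  unfold Spec_calc_date calc_date calc_date_alt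
  by_cases h : PySem.Int.mod year 4 = 0 <;>
    simp only [h, if_true, if_false, ne_eq, not_true_eq_false, not_false_eq_true, pv_e13,
      List.foldl_cons, List.foldl_nil] <;>
    norm_num [pv_d0, pv_d1, pv_d2, pv_d3, pv_d4, pv_d5, pv_d6, pv_d7, pv_d8, pv_d9, pv_d10, pv_d11, pv_c0, pv_c1, pv_c2, pv_c3, pv_c4, pv_c5, pv_c6, pv_c7, pv_c8, pv_c9, pv_c10, pv_c11] <;>
    simp only [pv_foldl_skip,
      pv_f28, pv_f29, pv_f30, List.append_assoc] <;>
    norm_num [pv_flat]
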